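-- pv_equiv track=rewrite | github.com/abojoudah/cs496-codeswitching | experiments/scripts/select_ar_en_cs_eval_sample.py | map_tag_for_counts
-- ===== SOURCE A (Python) =====
-- def map_tag_for_counts(tag: str):
--     """Original multi-label version used for sentence-level statistics."""
--     if tag in {"AR", "NE.AR"}:
--         return ["AR"]
--     if tag in {"EN", "NE.EN"}:
--         return ["EN"]
--     if tag in {"OTHER", "AMBIG"}:
--         return ["OTHER"]
--     if tag == "LANG3":
--         return ["OL"]
--
--     mapped = []
--     for part in tag.split():
--         if part in {"AR", "NE.AR"}:
--             mapped.append("AR")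
--         elif part in {"EN", "NE.EN"}:
--             mapped.append("EN")
--         elif part in {"OTHER", "AMBIG"}:
--             mapped.append("OTHER")
--         elif part == "LANG3":
--             mapped.append("OL")
--
--     output = []
--     for item in mapped:
--         if item not in output:
--             output.append(item)
--     return output
-- ===== SOURCE B (Python) =====
-- def map_tag_for_counts(tag: str):
--     """Single fused pass: four first-seen flags, emit a category the first time it
--     appears; no intermediate mapped list and no membership-based dedup stage."""
--     seen_ar = seen_en = seen_other = seen_ol = False
--     out = []
--     for p in tag.split():
--         if not seen_ar and p in ("AR", "NE.AR"):
--             seen_ar = True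
--             out.append("AR")
--         elif not seen_en and p in ("EN", "NE.EN"):
--             seen_en = True
--             out.append("EN")
--         elif not seen_other and p in ("OTHER", "AMBIG"):
--             seen_other = True
--             out.append("OTHER")
--         elif not seen_ol and p == "LANG3":
--             seen_ol = True
--             out.append("OL")
--     return out
-- ===== Notes on version B (the rewrite author's own statement) =====
-- stated objective: simpler
-- what changed: Replaced A's four early-return special cases plus two staged passes (build a mapped list, then dedup it by quadratic list-membership scans) with one fused pass over tag.split() that keeps four constant-size first-seen boolean flags and appends each category at its first occurrence, so no intermediate list and no membership test over a growing output exist at all.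
import Mathlib
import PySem

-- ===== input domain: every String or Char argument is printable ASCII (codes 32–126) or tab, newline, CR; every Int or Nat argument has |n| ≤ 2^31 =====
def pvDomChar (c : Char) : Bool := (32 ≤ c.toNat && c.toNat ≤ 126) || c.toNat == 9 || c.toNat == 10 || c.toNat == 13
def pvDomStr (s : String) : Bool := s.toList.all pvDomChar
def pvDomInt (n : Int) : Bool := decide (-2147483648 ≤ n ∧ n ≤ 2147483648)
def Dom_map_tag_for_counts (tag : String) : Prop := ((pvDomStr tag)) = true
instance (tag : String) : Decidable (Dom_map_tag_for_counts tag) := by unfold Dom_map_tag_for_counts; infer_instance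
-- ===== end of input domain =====

-- B fuses A's staged passes (map list then membership dedup) and its four early returns into one
-- pass over tag.split() with four first-seen boolean flags, appending each category once (simpler).


-- ===== PORT A =====
def map_tag_for_counts (tag : String) : List String :=
  if tag = "AR" ∨ tag = "NE.AR" then ["AR"]
  else if tag = "EN" ∨ tag = "NE.EN" then ["EN"]
  else if tag = "OTHER" ∨ tag = "AMBIG" then ["OTHER"]
  else if tag = "LANG3" then ["OL"]
  else
    let mapped := (PySem.Str.split₀ tag).foldl (fun acc part =>
      if part = "AR" ∨ part = "NE.AR" then acc ++ ["AR"]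
      else if part = "EN" ∨ part = "NE.EN" then acc ++ ["EN"]
      else if part = "OTHER" ∨ part = "AMBIG" then acc ++ ["OTHER"]
      else if part = "LANG3" then acc ++ ["OL"]
      else acc) []
    mapped.foldl (fun out item => if item ∈ out then out else out ++ [item]) []

-- ===== PORT B =====
-- one loop step of Source B: state = (seen_ar, seen_en, seen_other, seen_ol, out)
def pvStep (st : Bool × Bool × Bool × Bool × List String) (p : String) :
    Bool × Bool × Bool × Bool × List String :=
  let (sa, se, so, sl, out) := st
  if !sa && (p == "AR" || p == "NE.AR") then (true, se, so, sl, out ++ ["AR"])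
  else if !se && (p == "EN" || p == "NE.EN") then (sa, true, so, sl, out ++ ["EN"])
  else if !so && (p == "OTHER" || p == "AMBIG") then (sa, se, true, sl, out ++ ["OTHER"])
  else if !sl && (p == "LANG3") then (sa, se, so, true, out ++ ["OL"])
  else st

def map_tag_for_counts_alt (tag : String) : List String :=
  ((PySem.Str.split₀ tag).foldl pvStep (false, false, false, false, [])).2.2.2.2

-- ===== PRECONDITION & SPEC =====
def Spec_map_tag_for_counts (tag : String) (out : List String) : Prop := out = map_tag_for_counts_alt tag
instance (tag : String) (out : List String) : Decidable (Spec_map_tag_for_counts tag out) := by unfold Spec_map_tag_for_counts; infer_instance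

-- ===== CLAIM (what is proved, stated in full; the proofs are below) =====
def Claim_equal_map_tag_for_counts : Prop := ∀ (tag : String), Dom_map_tag_for_counts tag → Spec_map_tag_for_counts tag (map_tag_for_counts tag)

-- ===== LEMMAS AND PROOFS =====

-- the category of one token, as an Option (proof-side characterisation of A's if/elif chain)
def pvCat (p : String) : Option String :=
  if p = "AR" ∨ p = "NE.AR" then some "AR"
  else if p = "EN" ∨ p = "NE.EN" then some "EN"
  else if p = "OTHER" ∨ p = "AMBIG" then some "OTHER"
  else if p = "LANG3" then some "OL"
  else none

-- the flag-consistent states of B's pass: flags record membership in the output so far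
def pvFlags (out : List String) : Bool × Bool × Bool × Bool × List String :=
  (out.contains "AR", out.contains "EN", out.contains "OTHER", out.contains "OL", out)

-- A's mapping loop is filterMap pvCat
theorem pvMapLoop_eq (l : List String) (acc : List String) :
    l.foldl (fun acc part =>
      if part = "AR" ∨ part = "NE.AR" then acc ++ ["AR"]
      else if part = "EN" ∨ part = "NE.EN" then acc ++ ["EN"]
      else if part = "OTHER" ∨ part = "AMBIG" then acc ++ ["OTHER"]
      else if part = "LANG3" then acc ++ ["OL"]
      else acc) acc = acc ++ l.filterMap pvCat := by
  induction l generalizing acc with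
  | nil => simp
  | cons p t ih =>
    rw [List.foldl_cons, List.filterMap_cons]
    by_cases h1 : p = "AR" ∨ p = "NE.AR"
    · rw [if_pos h1, show pvCat p = some "AR" from by unfold pvCat; rw [if_pos h1], ih]; simp
    by_cases h2 : p = "EN" ∨ p = "NE.EN"
    · rw [if_neg h1, if_pos h2,
        show pvCat p = some "EN" from by unfold pvCat; rw [if_neg h1, if_pos h2], ih]; simp
    by_cases h3 : p = "OTHER" ∨ p = "AMBIG"
    · rw [if_neg h1, if_neg h2, if_pos h3,
        show pvCat p = some "OTHER" from by
          unfold pvCat; rw [if_neg h1, if_neg h2, if_pos h3], ih]; simp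
    by_cases h4 : p = "LANG3"
    · rw [if_neg h1, if_neg h2, if_neg h3, if_pos h4,
        show pvCat p = some "OL" from by
          unfold pvCat; rw [if_neg h1, if_neg h2, if_neg h3, if_pos h4], ih]; simp
    · rw [if_neg h1, if_neg h2, if_neg h3, if_neg h4,
        show pvCat p = none from by
          unfold pvCat; rw [if_neg h1, if_neg h2, if_neg h3, if_neg h4], ih]

-- one B step from a flag-consistent state performs A's dedup step on the token's category
theorem pvStep_flags (p : String) (out : List String) :
    pvStep (pvFlags out) p =
      pvFlags (match pvCat p with
        | some c => if c ∈ out then out else out ++ [c]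
        | none => out) := by
  by_cases h1 : p = "AR" ∨ p = "NE.AR"
  · have hc : pvCat p = some "AR" := by unfold pvCat; rw [if_pos h1]
    rw [hc]
    by_cases hm : "AR" ∈ out <;>
      rcases h1 with h | h <;> subst h <;>
      simp [pvStep, pvFlags, hm, List.mem_append]
  by_cases h2 : p = "EN" ∨ p = "NE.EN"
  · have hc : pvCat p = some "EN" := by unfold pvCat; rw [if_neg h1, if_pos h2]
    rw [hc]
    by_cases hm : "EN" ∈ out <;>
      rcases h2 with h | h <;> subst h <;>
      simp [pvStep, pvFlags, hm, List.mem_append]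
  by_cases h3 : p = "OTHER" ∨ p = "AMBIG"
  · have hc : pvCat p = some "OTHER" := by unfold pvCat; rw [if_neg h1, if_neg h2, if_pos h3]
    rw [hc]
    by_cases hm : "OTHER" ∈ out <;>
      rcases h3 with h | h <;> subst h <;>
      simp [pvStep, pvFlags, hm, List.mem_append]
  by_cases h4 : p = "LANG3"
  · have hc : pvCat p = some "OL" := by
      unfold pvCat; rw [if_neg h1, if_neg h2, if_neg h3, if_pos h4]
    rw [hc]
    by_cases hm : "OL" ∈ out <;> subst h4 <;>
      simp [pvStep, pvFlags, hm, List.mem_append]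
  · have hc : pvCat p = none := by unfold pvCat; rw [if_neg h1, if_neg h2, if_neg h3, if_neg h4]
    rw [hc]
    push Not at h1 h2 h3
    simp [pvStep, pvFlags, h1.1, h1.2, h2.1, h2.2, h3.1, h3.2, h4]

-- B's fused pass, from any flag-consistent state, equals A's dedup loop over the mapped rest
theorem pvFused_eq (l : List String) (out : List String) :
    (l.foldl pvStep (pvFlags out)).2.2.2.2 =
      (l.filterMap pvCat).foldl
        (fun out item => if item ∈ out then out else out ++ [item]) out := by
  induction l generalizing out with
  | nil => simp [pvFlags]
  | cons p t ih =>
    rw [List.foldl_cons, pvStep_flags, List.filterMap_cons]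
    cases hcat : pvCat p with
    | none => exact ih out
    | some c => simp only [List.foldl_cons]; exact ih _

-- ===== VERDICT (by name: the statement is the Claim_ definition above) =====
theorem map_tag_for_counts_spec : Claim_equal_map_tag_for_counts := by
  intro tag _
  unfold Spec_map_tag_for_counts map_tag_for_counts map_tag_for_counts_alt
  split_ifs with h1 h2 h3 h4
  · rcases h1 with h | h <;> subst h <;> decide
  · rcases h2 with h | h <;> subst h <;> decide
  · rcases h3 with h | h <;> subst h <;> decide
  · subst h4; decide
  · rw [pvMapLoop_eq, List.nil_append,
      show (false, false, false, false, ([] : List String)) = pvFlags [] from rfl, pvFused_eq]
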